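-- pv_equiv track=rewrite | github.com/block42-blockchain-company/thornode-telegram-bot | bot/handlers/chat_helpers.py | build_2_columns_keyboard
-- ===== SOURCE A (Python) =====
-- def build_2_columns_keyboard(buttons):
--     count = 0
--     keyboard = [[]]
--
--     for button in buttons:
--         if count % 2 == 0:
--             keyboard.append([button])
--         else:
--             keyboard[-1].append(button)
--
--         count += 1
--
--     return keyboard
-- ===== SOURCE B (Python) =====
-- def build_2_columns_keyboard(buttons):
--     buttons = list(buttons)
--     keyboard = [[]]
--     for i in range(0, len(buttons), 2):
--         keyboard.append(buttons[i:i + 2])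
--     return keyboard
-- ===== Notes on version B (the rewrite author's own statement) =====
-- stated objective: simpler
-- what changed: Replaces the per-element parity counter and append-to-last-row mutation with pairwise chunking: one loop over range(0, len, 2) appending each two-element slice as a complete row.
import Mathlib
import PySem

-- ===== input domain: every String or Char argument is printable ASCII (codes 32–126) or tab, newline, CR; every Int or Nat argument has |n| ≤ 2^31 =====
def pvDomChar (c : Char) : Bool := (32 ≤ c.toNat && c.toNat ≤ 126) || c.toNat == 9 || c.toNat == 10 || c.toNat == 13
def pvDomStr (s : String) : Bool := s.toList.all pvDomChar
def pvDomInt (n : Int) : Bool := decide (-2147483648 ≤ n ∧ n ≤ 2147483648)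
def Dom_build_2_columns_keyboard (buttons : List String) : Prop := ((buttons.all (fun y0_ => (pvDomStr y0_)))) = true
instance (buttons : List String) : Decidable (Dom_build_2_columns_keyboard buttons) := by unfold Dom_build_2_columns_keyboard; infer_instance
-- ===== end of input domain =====

-- B replaces A's parity-counter loop (append new row on even count, extend the last
-- row on odd) with pairwise chunking over range(0, len, 2); objective: simpler.
-- ===== PORT A =====
-- one iteration of A's loop body over state (count, keyboard)
def b2kStep (st : Int × List (List String)) (button : String) : Int × List (List String) :=
  let count := st.1
  let keyboard := st.2
  let keyboard' :=
    if count % 2 == 0 then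
      keyboard ++ [[button]]                                       -- keyboard.append([button])
    else
      keyboard.dropLast ++ [(keyboard.getLast?.getD []) ++ [button]]  -- keyboard[-1].append(button)
  (count + 1, keyboard')

def build_2_columns_keyboard (buttons : List String) : List (List String) :=
  (buttons.foldl b2kStep (0, [[]])).2

-- ===== PORT B =====
def build_2_columns_keyboard_alt (buttons : List String) : List (List String) :=
  [[]] ++ (PySem.List.pyRange 0 (buttons.length : Int) 2).map
    (fun i => PySem.List.slice buttons (some i) (some (i + 2)))

-- ===== PRECONDITION & SPEC =====
def Spec_build_2_columns_keyboard (buttons : List String) (out : List (List String)) : Prop := out = build_2_columns_keyboard_alt buttons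
instance (buttons : List String) (out : List (List String)) : Decidable (Spec_build_2_columns_keyboard buttons out) := by unfold Spec_build_2_columns_keyboard; infer_instance

-- ===== CLAIM (what is proved, stated in full; the proofs are below) =====
def Claim_equal_build_2_columns_keyboard : Prop := ∀ (buttons : List String), Dom_build_2_columns_keyboard buttons → Spec_build_2_columns_keyboard buttons (build_2_columns_keyboard buttons)

-- ===== LEMMAS AND PROOFS =====

-- consume the input two buttons at a time
def chunk2 : List String → List (List String)
  | [] => []
  | [x] => [[x]]
  | x :: y :: t => [x, y] :: chunk2 t

theorem foldA_chunk2 (l : List String) : ∀ (kb : List (List String)) (c : Int), c % 2 = 0 →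
    (l.foldl b2kStep (c, kb)).2 = kb ++ chunk2 l := by
  induction l using chunk2.induct with
  | case1 => intro kb c _; simp [chunk2]
  | case2 x => intro kb c hc; simp [chunk2, b2kStep, hc]
  | case3 x y t ih =>
    intro kb c hc
    have h1 : (c + 1) % 2 ≠ 0 := by omega
    have h2 : (c + 1 + 1) % 2 = 0 := by omega
    simp only [List.foldl_cons, b2kStep, hc, beq_iff_eq, if_true, h1, if_false,
      List.dropLast_concat, List.getLast?_concat, Option.getD_some]
    rw [ih _ _ h2]
    simp [chunk2]

theorem slice2_dropTake (l : List String) (k : Nat) :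
    PySem.List.slice l (some (0 + 2 * (k : Int))) (some (0 + 2 * (k : Int) + 2))
      = (l.drop (2 * k)).take 2 := by
  rw [show (0 + 2 * (k : Int)) = ((2 * k : Nat) : Int) by push_cast; ring,
    show ((2 * k : Nat) : Int) + 2 = ((2 * k : Nat) : Int) + ((2 : Nat) : Int) by norm_num,
    PySem.List.slice_natCast_add]

theorem dropTake_chunk2 (l : List String) :
    (List.range ((l.length + 1) / 2)).map (fun k => (l.drop (2 * k)).take 2) = chunk2 l := by
  induction l using chunk2.induct with
  | case1 => simp [chunk2]
  | case2 x => simp [chunk2]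
  | case3 x y t ih =>
    have hl : ((x :: y :: t).length + 1) / 2 = (t.length + 1) / 2 + 1 := by simp; omega
    rw [hl, List.range_succ_eq_map, List.map_cons, List.map_map]
    simp only [chunk2, Function.comp_def]
    refine congrArg₂ List.cons ?_ ?_
    · rfl
    rw [← ih]
    apply List.map_congr_left
    intro k _
    rw [show 2 * (k + 1) = (2 * k) + 1 + 1 by ring]
    simp [List.drop_succ_cons]

theorem altB_chunk2 (l : List String) : build_2_columns_keyboard_alt l = [[]] ++ chunk2 l := by
  unfold build_2_columns_keyboard_alt
  rw [PySem.List.pyRange_of_pos 0 (l.length : Int) (by norm_num)]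
  have hn : (if (0:Int) < (l.length : Int) then (((l.length : Int) - 0 + 2 - 1) / 2).toNat else 0)
      = (l.length + 1) / 2 := by
    split <;> omega
  rw [hn, List.map_map]
  congr 1
  rw [← dropTake_chunk2 l]
  apply List.map_congr_left
  intro k _
  exact slice2_dropTake l k

-- ===== VERDICT (by name: the statement is the Claim_ definition above) =====
theorem build_2_columns_keyboard_spec : Claim_equal_build_2_columns_keyboard := by
  intro buttons _
  unfold Spec_build_2_columns_keyboard build_2_columns_keyboard
  rw [foldA_chunk2 buttons [[]] 0 rfl, altB_chunk2]
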